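-- pv_equiv track=rewrite | github.com/alexandraback/datacollection | solutions_2464487_0/Python/mcsharma1990/temp.py | solve
-- ===== SOURCE A (Python) =====
-- def solve(r, t):
--     u = 10000000000000000000
--     l = 1
--     while (u-l > 1):
--         k = (u+l)//2;
--         if 2*r*k+k*(2*k-1) <= t:
--             l = k;
--         else:
--             u = k
--     return l
-- ===== SOURCE B (Python) =====
-- def _isqrt(n):
--     # floor square root by binary digit descent; 1 << 34 suffices since
--     # c*c + 8*t < 2**70 for |r|, |t| <= 2**31
--     x = 0
--     bit = 1 << 34
--     while bit:
--         if (x + bit) * (x + bit) <= n: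
--             x += bit
--         bit >>= 1
--     return x
--
--
-- def solve(r, t):
--     # largest k with 2*r*k + k*(2*k-1) <= t, via the closed-form root of
--     # 2k^2 + (2r-1)k - t; returns 1 when no k >= 1 qualifies
--     c = 2 * r - 1
--     d = c * c + 8 * t
--     if d < 0:
--         return 1
--     s = _isqrt(d)
--     b = (s - c) // 4
--     if b < 1 or 2 * b * b + c * b > t:
--         return 1
--     return b
-- ===== Notes on version B (the rewrite author's own statement) =====
-- stated objective: faster
-- what changed: Replaces A's 63-iteration binary search over [1,10^19) with the closed-form integer root of 2k^2+(2r-1)k-t<=0, computed exactly with a hand-rolled integer square root (no imports), returning 1 when no k>=1 qualifies.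
-- intended difference: On inputs (only possible for negative r) where some k>=2 satisfies 2rk+k(2k-1)<=t but none of the 63 fixed midpoints of A's descending search does, A returns 1 because its binary search over the non-monotone predicate never finds the feasible block, while B returns the largest feasible k, which is the value the function is meant to compute. — e.g. on solve(-15, -118): A returns 1, B returns 8
import Mathlib
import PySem

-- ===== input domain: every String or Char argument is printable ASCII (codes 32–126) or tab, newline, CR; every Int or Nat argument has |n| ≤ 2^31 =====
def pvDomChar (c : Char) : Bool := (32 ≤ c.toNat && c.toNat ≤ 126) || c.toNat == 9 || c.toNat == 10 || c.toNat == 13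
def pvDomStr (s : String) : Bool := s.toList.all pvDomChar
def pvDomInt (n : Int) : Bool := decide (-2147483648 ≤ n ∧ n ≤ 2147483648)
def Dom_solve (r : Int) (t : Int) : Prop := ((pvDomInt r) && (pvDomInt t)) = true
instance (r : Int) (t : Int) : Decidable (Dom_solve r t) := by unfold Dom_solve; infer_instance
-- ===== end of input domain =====

-- B replaces A's binary search by the closed-form integer root of 2k^2+(2r-1)k-t
-- (via a hand-rolled integer square root); on a rare corner (negative r, where the
-- feasible block misses every midpoint A's search can probe) A returns 1 while B
-- returns the largest feasible k — stated below as the intended difference D_solve.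

-- ===== PORT A =====
-- while (u-l > 1): k=(u+l)//2; if 2*r*k+k*(2*k-1) <= t: l=k else: u=k; return l
-- (the fuel argument only makes the recursion structural: 70 halvings more than
-- exhaust the interval [1, 10^19), so the 0-fuel branch is never reached)
def bsearchA (r : Int) (t : Int) : Nat → Int → Int → Int
  | 0, l, _ => l
  | fuel + 1, l, u =>
    if u - l > 1 then
      let k := PySem.Int.floordiv (u + l) 2
      if 2*r*k + k*(2*k - 1) ≤ t then bsearchA r t fuel k u else bsearchA r t fuel l k
    else l

def solve (r : Int) (t : Int) : Int :=
  bsearchA r t 70 1 10000000000000000000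

-- ===== PORT B =====
-- def _isqrt(n): x=0; bit=1<<34; while bit: if (x+bit)*(x+bit)<=n: x+=bit; bit>>=1; return x
-- (bit stays nonnegative, so 'while bit' is 'while bit > 0' and 'bit >> 1' is 'bit // 2';
-- the fuel argument only makes the recursion structural: 35 halvings empty bit = 2^34)
def isqrtLoop (n : Int) : Nat → Int → Int → Int
  | 0, x, _ => x
  | fuel + 1, x, bit =>
    if bit > 0 then
      isqrtLoop n fuel (if (x + bit) * (x + bit) ≤ n then x + bit else x) (PySem.Int.floordiv bit 2)
    else x

def isqrtB (n : Int) : Int := isqrtLoop n 35 0 17179869184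

def solve_alt (r : Int) (t : Int) : Int :=
  let c := 2*r - 1
  let d := c*c + 8*t
  if d < 0 then 1
  else
    let s := isqrtB d
    let b := PySem.Int.floordiv (s - c) 4
    if b < 1 ∨ 2*b*b + c*b > t then 1 else b

-- ===== PRECONDITION & SPEC =====
-- the 63 midpoints A's binary search can probe while every test fails, as plain
-- literals: the j-th is 9999999999999999999 // 2^j + 1 for j = 1..63
def pvProbes : List Int :=
  [5000000000000000000, 2500000000000000000, 1250000000000000000, 625000000000000000,
   312500000000000000, 156250000000000000, 78125000000000000, 39062500000000000,
   19531250000000000, 9765625000000000, 4882812500000000, 2441406250000000,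
   1220703125000000, 610351562500000, 305175781250000, 152587890625000,
   76293945312500, 38146972656250, 19073486328125, 9536743164063, 4768371582032,
   2384185791016, 1192092895508, 596046447754, 298023223877, 149011611939,
   74505805970, 37252902985, 18626451493, 9313225747, 4656612874, 2328306437,
   1164153219, 582076610, 291038305, 145519153, 72759577, 36379789, 18189895,
   9094948, 4547474, 2273737, 1136869, 568435, 284218, 142109, 71055, 35528,
   17764, 8882, 4441, 2221, 1111, 556, 278, 139, 70, 35, 18, 9, 5, 3, 2]

-- On inputs where some k ≥ 2 satisfies 2k^2+(2r-1)k ≤ t (witnessed at one of the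
-- three candidate points 2, (1-2r)//4, (1-2r)//4+1 near the parabola's vertex) but
-- the bound fails at each of the 63 fixed midpoints above (possible only for
-- negative r, where the quadratic is not monotone on [1,10^19)), A returns 1 — its
-- search never finds the feasible block — while B returns the largest feasible k,
-- the value the function is meant to compute.
def D_solve (r : Int) (t : Int) : Prop :=
  (∀ p ∈ pvProbes, t < 2*p*p + (2*r - 1)*p) ∧
  (∃ k ∈ [2, (1 - 2*r)/4, (1 - 2*r)/4 + 1], 2 ≤ k ∧ 2*k*k + (2*r - 1)*k ≤ t)
instance (r : Int) (t : Int) : Decidable (D_solve r t) := by unfold D_solve; infer_instance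

def Spec_solve (r : Int) (t : Int) (out : Int) : Prop := ¬ D_solve r t → out = solve_alt r t
instance (r : Int) (t : Int) (out : Int) : Decidable (Spec_solve r t out) := by
  unfold Spec_solve; infer_instance

def pvDiffWitness_solve : Int × Int := (-15, -118)
def pvDiffWitnessOut_solve : Int × Int := (1, 8)

-- ===== CLAIM (what is proved, stated in full; the proofs are below) =====
def Claim_unchanged_solve : Prop := ∀ (r : Int) (t : Int), Dom_solve r t → Spec_solve r t (solve r t)
def Claim_changed_solve : Prop := Dom_solve (pvDiffWitness_solve.1) (pvDiffWitness_solve.2) ∧ D_solve (pvDiffWitness_solve.1) (pvDiffWitness_solve.2) ∧ solve (pvDiffWitness_solve.1) (pvDiffWitness_solve.2) = pvDiffWitnessOut_solve.1 ∧ solve_alt (pvDiffWitness_solve.1) (pvDiffWitness_solve.2) = pvDiffWitnessOut_solve.2 ∧ pvDiffWitnessOut_solve.1 ≠ pvDiffWitnessOut_solve.2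
def Claim_exact_solve : Prop := ∀ (r : Int) (t : Int), Dom_solve r t → D_solve r t → solve r t ≠ solve_alt r t

-- ===== LEMMAS AND PROOFS =====

-- proof-side mirror of the probe chain, following bsearchA's recursion
def probesFromAux : Nat → Int → List Int
  | 0, _ => []
  | m + 1, u => if 2 < u then (u + 1) / 2 :: probesFromAux m ((u + 1) / 2) else []

-- proof-side closed form of the j-th probe
def probeAt (j : Nat) : Int := 9999999999999999999 / 2^j + 1

-- each closed-form probe with 1 ≤ j ≤ 63 is in the literal list, and conversely
set_option maxRecDepth 20000 in
theorem probeAt_mem : ∀ j ∈ List.range 64, 1 ≤ j → probeAt j ∈ pvProbes := by decide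

set_option maxRecDepth 20000 in
theorem pvProbes_idx : ∀ p ∈ pvProbes, ∃ j ∈ List.range 64, 1 ≤ j ∧ p = probeAt j := by decide

theorem floordiv_two (a : Int) : PySem.Int.floordiv a 2 = a / 2 :=
  PySem.Int.floordiv_eq_ediv_of_pos (by norm_num)

theorem floordiv_four (a : Int) : PySem.Int.floordiv a 4 = a / 4 :=
  PySem.Int.floordiv_eq_ediv_of_pos (by norm_num)

theorem bsearchA_succ (r t : Int) (fuel : Nat) (l u : Int) :
    bsearchA r t (fuel + 1) l u =
      if u - l > 1 then
        (if 2*r*((u + l) / 2) + ((u + l) / 2)*(2*((u + l) / 2) - 1) ≤ t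
         then bsearchA r t fuel ((u + l) / 2) u
         else bsearchA r t fuel l ((u + l) / 2))
      else l := by
  simp only [bsearchA, floordiv_two]

-- the quadratic is convex, so the feasible set is an integer interval
theorem conv_interval (r t x y z : Int) (hxy : x ≤ y) (hyz : y ≤ z)
    (hx : 2*r*x + x*(2*x - 1) ≤ t) (hz : 2*r*z + z*(2*z - 1) ≤ t) :
    2*r*y + y*(2*y - 1) ≤ t := by
  by_cases hs : 2*(y + x) + (2*r - 1) ≤ 0
  · nlinarith [mul_nonneg (by omega : (0:Int) ≤ y - x) (by omega : (0:Int) ≤ -(2*(y + x) + (2*r - 1)))]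
  · nlinarith [mul_nonneg (by omega : (0:Int) ≤ z - y) (by omega : (0:Int) ≤ 2*(y + z) + (2*r - 1))]

theorem isqrtLoop_correct : ∀ (K : Nat) (n x : Int), 0 ≤ x → x*x ≤ n →
    n < (x + 2*2^K)*(x + 2*2^K) →
    0 ≤ isqrtLoop n (K + 1) x (2^K) ∧ (isqrtLoop n (K + 1) x (2^K))*(isqrtLoop n (K + 1) x (2^K)) ≤ n ∧
      n < (isqrtLoop n (K + 1) x (2^K) + 1)*(isqrtLoop n (K + 1) x (2^K) + 1) := by
  intro K
  induction K with
  | zero =>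
    intro n x hx h1 h2
    have hrw : isqrtLoop n 1 x (2^0) =
        if (x + 2^0) * (x + 2^0) ≤ n then x + 2^0 else x := by
      simp only [isqrtLoop, if_pos (show (2:Int)^0 > 0 by norm_num)]
    simp only [pow_zero] at hrw h2 ⊢
    rw [hrw]
    by_cases hc : (x + 1) * (x + 1) ≤ n
    · rw [if_pos hc]; refine ⟨by omega, hc, by nlinarith⟩
    · rw [if_neg hc]; exact ⟨hx, h1, by omega⟩
  | succ K ih =>
    intro n x hx h1 h2
    have hp : (0:Int) < 2^(K+1) := by positivity
    have hfd : PySem.Int.floordiv ((2:Int)^(K+1)) 2 = 2^K := by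
      rw [floordiv_two, pow_succ, mul_comm]
      exact Int.mul_ediv_cancel_left _ (by norm_num)
    have hstep : isqrtLoop n (K + 1 + 1) x (2^(K+1)) =
        isqrtLoop n (K + 1) (if (x + 2^(K+1)) * (x + 2^(K+1)) ≤ n then x + 2^(K+1) else x) (2^K) := by
      simp only [isqrtLoop, hfd, if_pos hp]
    rw [hstep]
    by_cases hc : (x + 2^(K+1)) * (x + 2^(K+1)) ≤ n
    · rw [if_pos hc]
      refine ih n (x + 2^(K+1)) (by positivity) hc ?_
      have he : x + 2^(K+1) + 2*2^K = x + 2*2^(K+1) := by rw [pow_succ]; ring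
      rw [he]; exact h2
    · rw [if_neg hc]
      refine ih n x hx h1 ?_
      have he : x + 2*2^K = x + 2^(K+1) := by rw [pow_succ]; ring
      rw [he]; omega

theorem isqrtB_correct (n : Int) (h0 : 0 ≤ n) (h1 : n < 1180591620717411303424) :
    0 ≤ isqrtB n ∧ (isqrtB n)*(isqrtB n) ≤ n ∧ n < (isqrtB n + 1)*(isqrtB n + 1) := by
  have h34 : (17179869184:Int) = 2^34 := by norm_num
  have := isqrtLoop_correct 34 n 0 le_rfl (by omega) (by norm_num; omega)
  unfold isqrtB
  rw [h34]
  exact this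

-- B's result when some k ≥ 2 is feasible: it is feasible and maximal
theorem alt_found (r t k0 : Int)
    (hd70 : (2*r - 1)*(2*r - 1) + 8*t < 1180591620717411303424)
    (hk0 : 2 ≤ k0) (hf0 : 2*r*k0 + k0*(2*k0 - 1) ≤ t) :
    2 ≤ solve_alt r t ∧ (2*r*(solve_alt r t) + (solve_alt r t)*(2*(solve_alt r t) - 1) ≤ t)
      ∧ ∀ k, 2*r*k + k*(2*k - 1) ≤ t → k ≤ solve_alt r t := by
  have hsq0 : (4*k0 + (2*r - 1))*(4*k0 + (2*r - 1)) ≤ (2*r - 1)*(2*r - 1) + 8*t := by nlinarith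
  have hd0 : 0 ≤ (2*r - 1)*(2*r - 1) + 8*t :=
    le_trans (mul_self_nonneg (4*k0 + (2*r - 1))) hsq0
  obtain ⟨hs0, hs1, hs2⟩ := isqrtB_correct _ hd0 hd70
  set s := isqrtB ((2*r - 1)*(2*r - 1) + 8*t) with hsdef
  have hub0 : 4*k0 + (2*r - 1) ≤ s := by by_contra h; push_neg at h; nlinarith
  have hlb0 : -s ≤ 4*k0 + (2*r - 1) := by by_contra h; push_neg at h; nlinarith
  have hb1 : 4*((s - (2*r - 1)) / 4) ≤ s - (2*r - 1) := by omega
  have hb2 : s - (2*r - 1) < 4*((s - (2*r - 1)) / 4) + 4 := by omega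
  set b := (s - (2*r - 1)) / 4 with hbdef
  have hk0b : k0 ≤ b := by omega
  have hfb : 2*r*b + b*(2*b - 1) ≤ t := by
    have hsq : (4*b + (2*r - 1))*(4*b + (2*r - 1)) ≤ s*s := by nlinarith
    nlinarith
  have hmax : ∀ k, 2*r*k + k*(2*k - 1) ≤ t → k ≤ b := by
    intro k hk
    have hsq : (4*k + (2*r - 1))*(4*k + (2*r - 1)) ≤ (2*r - 1)*(2*r - 1) + 8*t := by nlinarith
    have hub : 4*k + (2*r - 1) ≤ s := by by_contra h; push_neg at h; nlinarith
    omega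
  have halt : solve_alt r t = b := by
    simp only [solve_alt]
    rw [if_neg (by omega : ¬ ((2*r - 1)*(2*r - 1) + 8*t < 0)), ← hsdef, floordiv_four]
    rw [if_neg ?_]
    push_neg
    constructor
    · omega
    · nlinarith
  rw [halt]
  exact ⟨by omega, hfb, hmax⟩

-- B's result when no k ≥ 2 is feasible: 1
theorem alt_none (r t : Int) (hnone : ∀ k, 2 ≤ k → ¬ (2*r*k + k*(2*k - 1) ≤ t)) :
    solve_alt r t = 1 := by
  simp only [solve_alt]
  by_cases hd : (2*r - 1)*(2*r - 1) + 8*t < 0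
  · rw [if_pos hd]
  · rw [if_neg hd]
    set s := isqrtB ((2*r - 1)*(2*r - 1) + 8*t)
    set b := PySem.Int.floordiv (s - (2*r - 1)) 4 with hbdef
    by_cases hc : b < 1 ∨ 2*b*b + (2*r - 1)*b > t
    · rw [if_pos hc]
    · rw [if_neg hc]
      push_neg at hc
      by_contra hne
      exact hnone b (by omega) (by nlinarith [hc.2])

-- every probe point in the proof-side chain is at least 2
theorem mem_probesFromAux : ∀ (m : Nat) (u p : Int), p ∈ probesFromAux m u → 2 ≤ p := by
  intro m
  induction m with
  | zero => intro u p hp; simp [probesFromAux] at hp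
  | succ m ih =>
    intro u p hp
    simp only [probesFromAux] at hp
    by_cases hu : 2 < u
    · rw [if_pos hu] at hp
      rcases List.mem_cons.mp hp with h | h
      · omega
      · exact ih _ _ h
    · rw [if_neg hu] at hp; simp at hp

-- the proof-side probe chain is exactly the closed-form probe points
theorem mem_probes_iff : ∀ (m : Nat) (x : Int), 1 ≤ x → ∀ p,
    (p ∈ probesFromAux m (x + 1) ↔ ∃ j : Nat, 1 ≤ j ∧ j ≤ m ∧ p = x / 2^j + 1 ∧ 1 ≤ x / 2^j) := by
  intro m
  induction m with
  | zero =>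
    intro x hx p
    simp only [probesFromAux]
    constructor
    · intro h; simp at h
    · rintro ⟨j, hj1, hj0, _⟩; omega
  | succ m ih =>
    intro x hx p
    by_cases hu : 2 < x + 1
    · have hhead : (x + 1 + 1) / 2 = x / 2 + 1 := by omega
      have hx2 : (1:Int) ≤ x / 2 := by omega
      simp only [probesFromAux, if_pos hu, hhead, List.mem_cons]
      rw [ih (x / 2) hx2 p]
      constructor
      · rintro (hp | ⟨j, hj1, hjm, hpe, hpd⟩)
        · exact ⟨1, le_rfl, by omega, by rw [hp]; norm_num, by norm_num; omega⟩
        · refine ⟨j + 1, by omega, by omega, ?_, ?_⟩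
          · rw [hpe, pow_succ, mul_comm, ← Int.ediv_ediv_of_nonneg (by positivity : (0:Int) ≤ 2)]
          · rw [pow_succ, mul_comm, ← Int.ediv_ediv_of_nonneg (by positivity : (0:Int) ≤ 2)]
            exact hpd
      · rintro ⟨j, hj1, hjm, hpe, hpd⟩
        match j, hj1 with
        | 1, _ => left; rw [hpe]; norm_num
        | (j' + 2), _ =>
          right
          refine ⟨j' + 1, by omega, by omega, ?_, ?_⟩
          · rw [hpe]
            congr 1
            rw [show j' + 2 = (j' + 1) + 1 by omega, pow_succ, mul_comm,
              ← Int.ediv_ediv_of_nonneg (by positivity : (0:Int) ≤ 2)]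
          · rw [show j' + 2 = (j' + 1) + 1 by omega, pow_succ, mul_comm,
              ← Int.ediv_ediv_of_nonneg (by positivity : (0:Int) ≤ 2)] at hpd
            exact hpd
    · have hx1 : x = 1 := by omega
      subst hx1
      simp only [probesFromAux, if_neg hu]
      constructor
      · intro h; simp at h
      · rintro ⟨j, hj1, hjm, hpe, hpd⟩
        have h2j : (2:Int) ≤ 2^j := by
          calc (2:Int) = 2^1 := by norm_num
          _ ≤ 2^j := pow_le_pow_right₀ (by norm_num) hj1
        have : (1:Int) / 2^j = 0 := Int.ediv_eq_zero_of_lt (by norm_num) (by omega)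
        omega

-- failing at the 63 literal probes = failing along the whole probe chain
theorem allfail_chain (r t : Int)
    (hall : ∀ p ∈ pvProbes, t < 2*p*p + (2*r - 1)*p) :
    ∀ p ∈ probesFromAux 70 10000000000000000000, ¬ (2*r*p + p*(2*p - 1) ≤ t) := by
  intro p hp
  have hx : (10000000000000000000:Int) = 9999999999999999999 + 1 := by norm_num
  rw [hx] at hp
  obtain ⟨j, hj1, hjm, hpe, hpd⟩ := (mem_probes_iff 70 9999999999999999999 (by norm_num) p).mp hp
  have hj63 : j ≤ 63 := by
    by_contra hbig
    push_neg at hbig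
    have h2j : (2:Int)^64 ≤ 2^j := pow_le_pow_right₀ (by norm_num) (by omega)
    have : (9999999999999999999:Int) / 2^j = 0 :=
      Int.ediv_eq_zero_of_lt (by norm_num) (by norm_num at h2j ⊢; omega)
    omega
  have hmem : p ∈ pvProbes := by
    have := probeAt_mem j (List.mem_range.mpr (by omega)) hj1
    simpa [probeAt, ← hpe] using this
  have hlt := hall p hmem
  have heq : 2*r*p + p*(2*p - 1) = 2*p*p + (2*r - 1)*p := by ring
  omega

-- conversely, each closed-form probe is on the chain
theorem probeAt_mem_chain (j : Nat) (hj1 : 1 ≤ j) (hj63 : j ≤ 63) :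
    probeAt j ∈ probesFromAux 70 10000000000000000000 := by
  have hx : (10000000000000000000:Int) = 9999999999999999999 + 1 := by norm_num
  rw [hx]
  refine (mem_probes_iff 70 9999999999999999999 (by norm_num) (probeAt j)).mpr
    ⟨j, hj1, by omega, rfl, ?_⟩
  have h2j : (2:Int)^j ≤ 2^63 := pow_le_pow_right₀ (by norm_num) hj63
  have hpos : (0:Int) < 2^j := by positivity
  rw [Int.le_ediv_iff_mul_le hpos]
  norm_num at h2j ⊢
  omega

-- the monotone phase of A's search: once characterized by a threshold b, it returns b
theorem bsearch_max (r t b : Int) : ∀ (f : Nat) (l u : Int), u - l ≤ 2^f → l ≤ b → b < u →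
    (∀ k, l ≤ k → (2*r*k + k*(2*k - 1) ≤ t ↔ k ≤ b)) → bsearchA r t f l u = b := by
  intro f
  induction f with
  | zero =>
    intro l u h hlb hbu _
    norm_num at h
    have : l = b := by omega
    simp only [bsearchA]
    omega
  | succ f ih =>
    intro l u h hlb hbu hiff
    rw [bsearchA_succ]
    by_cases hc : u - l > 1
    · rw [if_pos hc]
      have hml : l < (u + l) / 2 := by omega
      have hmu : (u + l) / 2 < u := by omega
      have hpow : (2:Int)^(f+1) = 2*2^f := by rw [pow_succ]; ring
      by_cases ht : 2*r*((u + l) / 2) + ((u + l) / 2)*(2*((u + l) / 2) - 1) ≤ t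
      · rw [if_pos ht]
        have hmb : (u + l) / 2 ≤ b := (hiff _ (by omega)).mp ht
        exact ih _ u (by omega) hmb hbu (fun k hk => hiff k (by omega))
      · rw [if_neg ht]
        have hbm : b < (u + l) / 2 := by
          by_contra hh; push_neg at hh
          exact ht ((hiff _ (by omega)).mpr hh)
        exact ih l _ (by omega) hlb hbm hiff
    · rw [if_neg hc]
      omega

-- the descending phase when every probe fails: the search returns 1
theorem bsearch_allfail (r t : Int) : ∀ (f : Nat) (u : Int), 2 ≤ u → u ≤ 2^f + 1 →
    (∀ p ∈ probesFromAux f u, ¬ (2*r*p + p*(2*p - 1) ≤ t)) → bsearchA r t f 1 u = 1 := by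
  intro f
  induction f with
  | zero =>
    intro u h2 hb _
    simp only [bsearchA]
  | succ f ih =>
    intro u h2 hb hall
    rw [bsearchA_succ]
    by_cases hu : 2 < u
    · rw [if_pos (by omega)]
      have hhd : (u + 1) / 2 ∈ probesFromAux (f + 1) u := by
        simp only [probesFromAux, if_pos hu]; exact List.mem_cons_self ..
      rw [if_neg (hall _ hhd)]
      have hpow : (2:Int)^(f+1) = 2*2^f := by rw [pow_succ]; ring
      refine ih ((u + 1) / 2) (by omega) (by omega) ?_
      intro p hp
      refine hall p ?_
      simp only [probesFromAux, if_pos hu]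
      exact List.mem_cons_of_mem _ hp
    · rw [if_neg (by omega)]

-- the descending phase when some probe is feasible: the search returns the maximum b
theorem bsearch_found (r t b : Int) (hfb : 2*r*b + b*(2*b - 1) ≤ t)
    (hmax : ∀ k, 2*r*k + k*(2*k - 1) ≤ t → k ≤ b) :
    ∀ (f : Nat) (u : Int), 2 ≤ u → u ≤ 2^f + 1 → ¬ (2*r*u + u*(2*u - 1) ≤ t) →
    (∃ p ∈ probesFromAux f u, 2*r*p + p*(2*p - 1) ≤ t) → bsearchA r t f 1 u = b := by
  intro f
  induction f with
  | zero => intro u _ _ _ hex; simp [probesFromAux] at hex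
  | succ f ih =>
    intro u h2 hb hfu hex
    by_cases hu : 2 < u
    · rw [bsearchA_succ, if_pos (by omega)]
      have hpow : (2:Int)^(f+1) = 2*2^f := by rw [pow_succ]; ring
      by_cases hf : 2*r*((u + 1) / 2) + ((u + 1) / 2)*(2*((u + 1) / 2) - 1) ≤ t
      · rw [if_pos hf]
        have hkb : (u + 1) / 2 ≤ b := hmax _ hf
        have hbu : b < u := by
          by_contra hh; push_neg at hh
          exact hfu (conv_interval r t ((u + 1) / 2) u b (by omega) hh hf hfb)
        refine bsearch_max r t b f ((u + 1) / 2) u (by omega) hkb hbu ?_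
        intro k hk
        constructor
        · exact hmax k
        · intro hkb2
          exact conv_interval r t ((u + 1) / 2) k b hk hkb2 hf hfb
      · rw [if_neg hf]
        refine ih ((u + 1) / 2) (by omega) (by omega) hf ?_
        obtain ⟨p, hp, hpf⟩ := hex
        simp only [probesFromAux, if_pos hu] at hp
        rcases List.mem_cons.mp hp with h | h
        · exact absurd (h ▸ hpf) hf
        · exact ⟨p, h, hpf⟩
    · exfalso
      have hu2 : u = 2 := by omega
      subst hu2
      norm_num [probesFromAux] at hex

-- numeric bounds from the input domain
theorem disc_lt (r t : Int) (hr1 : -2147483648 ≤ r) (hr2 : r ≤ 2147483648)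
    (ht2 : t ≤ 2147483648) :
    (2*r - 1)*(2*r - 1) + 8*t < 1180591620717411303424 := by
  nlinarith [mul_nonneg (by omega : (0:Int) ≤ 4294967297 - (2*r - 1))
      (by omega : (0:Int) ≤ 4294967297 + (2*r - 1))]

theorem not_f_top (r t : Int) (hr1 : -2147483648 ≤ r) (ht2 : t ≤ 2147483648) :
    ¬ (2*r*10000000000000000000 + 10000000000000000000*(2*10000000000000000000 - 1) ≤ t) := by
  have h : (10000000000000000000:Int)*(2*10000000000000000000 - 1)
      = 199999999999999999990000000000000000000 := by norm_num
  omega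

-- when some k ≥ 2 is feasible, one of the three candidate points of D_solve is feasible
theorem cand_of_exists (r t k : Int) (hk : 2 ≤ k) (hf : 2*r*k + k*(2*k - 1) ≤ t) :
    ∃ k' ∈ [2, (1 - 2*r)/4, (1 - 2*r)/4 + 1], 2 ≤ k' ∧ 2*k'*k' + (2*r - 1)*k' ≤ t := by
  set q := (1 - 2*r) / 4 with hqdef
  have hq1 : 4*q ≤ 1 - 2*r := by omega
  have hq2 : 1 - 2*r < 4*q + 4 := by omega
  by_cases hkq : k ≤ q
  · refine ⟨q, by simp, by omega, ?_⟩
    nlinarith [mul_nonneg (by omega : (0:Int) ≤ q - k)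
        (by omega : (0:Int) ≤ -(2*(k + q) + (2*r - 1)))]
  · by_cases hq2' : 2 ≤ q + 1
    · refine ⟨q + 1, by simp, hq2', ?_⟩
      nlinarith [mul_nonneg (by omega : (0:Int) ≤ k - (q + 1))
          (by omega : (0:Int) ≤ 2*(k + (q + 1)) + (2*r - 1))]
    · refine ⟨2, by simp, le_rfl, ?_⟩
      nlinarith [mul_nonneg (by omega : (0:Int) ≤ k - 2)
          (by omega : (0:Int) ≤ 2*(k + 2) + (2*r - 1))]

-- ===== VERDICT (by name: the statement is the Claim_ definition above) =====
theorem solve_spec : Claim_unchanged_solve := by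
  intro r t hdom
  unfold Spec_solve
  intro hnd
  simp only [Dom_solve, pvDomInt, Bool.and_eq_true, decide_eq_true_eq] at hdom
  obtain ⟨⟨hr1, hr2⟩, ht1, ht2⟩ := hdom
  have hU := not_f_top r t hr1 ht2
  by_cases hex : ∃ k, 2 ≤ k ∧ 2*r*k + k*(2*k - 1) ≤ t
  · obtain ⟨k0, hk02, hfk0⟩ := hex
    obtain ⟨hB2, hBf, hBmax⟩ := alt_found r t k0 (disc_lt r t hr1 hr2 ht2) hk02 hfk0
    by_cases hpb : ∃ p ∈ probesFromAux 70 10000000000000000000, 2*r*p + p*(2*p - 1) ≤ t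
    · exact bsearch_found r t (solve_alt r t) hBf hBmax 70 10000000000000000000
        (by norm_num) (by norm_num) hU hpb
    · exfalso
      apply hnd
      refine ⟨fun p hp => ?_, cand_of_exists r t k0 hk02 hfk0⟩
      obtain ⟨j, hjr, hj1, hpe⟩ := pvProbes_idx p hp
      have hmem := probeAt_mem_chain j hj1 (by simp [List.mem_range] at hjr; omega)
      by_contra hno
      push_neg at hno
      have heq : 2*r*p + p*(2*p - 1) = 2*p*p + (2*r - 1)*p := by ring
      exact hpb ⟨p, hpe ▸ hmem, by omega⟩
  · push_neg at hex
    have hall : ∀ p ∈ probesFromAux 70 10000000000000000000, ¬ (2*r*p + p*(2*p - 1) ≤ t) :=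
      fun p hp => by
        have := hex p (mem_probesFromAux 70 _ p hp)
        omega
    have hA : solve r t = 1 :=
      bsearch_allfail r t 70 10000000000000000000 (by norm_num) (by norm_num) hall
    have hB : solve_alt r t = 1 := alt_none r t (fun k hk => by
      have := hex k hk
      omega)
    rw [hA, hB]

theorem solve_changed : Claim_changed_solve := by
  unfold Claim_changed_solve
  refine ⟨by decide, by decide, ?_, ?_, by decide⟩
  · have hall : ∀ p ∈ probesFromAux 70 10000000000000000000,
        ¬ (2*(-15:Int)*p + p*(2*p - 1) ≤ -118) :=
      allfail_chain (-15) (-118) (by decide)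
    exact bsearch_allfail (-15) (-118) 70 10000000000000000000 (by norm_num) (by norm_num) hall
  · obtain ⟨hB2, hBf, hBmax⟩ := alt_found (-15) (-118) 8 (by norm_num) (by norm_num) (by norm_num)
    have hge : (8:Int) ≤ solve_alt (-15) (-118) := hBmax 8 (by norm_num)
    have h9 : ¬ (2*(-15:Int)*9 + 9*(2*9 - 1) ≤ -118) := by norm_num
    have hle : solve_alt (-15) (-118) ≤ 8 := by
      by_contra hh
      push_neg at hh
      exact h9 (conv_interval (-15) (-118) 8 9 (solve_alt (-15) (-118))
        (by norm_num) (by omega) (by norm_num) hBf)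
    show solve_alt (-15) (-118) = 8
    omega

theorem solve_tight : Claim_exact_solve := by
  intro r t hdom hd
  simp only [Dom_solve, pvDomInt, Bool.and_eq_true, decide_eq_true_eq] at hdom
  obtain ⟨⟨hr1, hr2⟩, ht1, ht2⟩ := hdom
  obtain ⟨hall, k, hkmem, hk2, hfk⟩ := hd
  have hA : solve r t = 1 :=
    bsearch_allfail r t 70 10000000000000000000 (by norm_num) (by norm_num)
      (allfail_chain r t hall)
  have hfk' : 2*r*k + k*(2*k - 1) ≤ t := by
    have heq : 2*r*k + k*(2*k - 1) = 2*k*k + (2*r - 1)*k := by ring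
    omega
  obtain ⟨hB2, _, _⟩ := alt_found r t k (disc_lt r t hr1 hr2 ht2) hk2 hfk'
  rw [hA]
  omega
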